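-- pv_equiv track=rewrite | github.com/Pradippy-nxs/defuse | backendroblox.py | mathematicsChecker
-- ===== SOURCE A (Python) =====
-- def mathematicsChecker(pair):
--     solvedPair = []
--     number = ""
--     i = 0
--     while i < len(pair):
--         if len(number) == 2:
--             i = i - 1
--             solvedPair.append(int(number))
--             number = ""
--         elif pair[i] != " ":
--             match pair[i]:
--                 case "h":
--                     number += "0"
--                 case "a":
--                     number += "1"
--                 case "d":
--                     number += "2"
--                 case "b":
--                     number += "3"
--                 case "e":
--                     number += "4"
--                 case "f":
--                     number += "5"
--                 case "g":
--                     number += "6"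
--                 case "c":
--                     number += "7"
--                 case "i":
--                     number += "8"
--                 case "j":
--                     number += "9"
--                 case _:
--                     number += "0"
--         i += 1
--
--     if number != "":
--         solvedPair.append(int(number))
--     return solvedPair
-- ===== SOURCE B (Python) =====
-- def mathematicsChecker(pair):
--     mapping = {'h': '0', 'a': '1', 'd': '2', 'b': '3', 'e': '4',
--                'f': '5', 'g': '6', 'c': '7', 'i': '8', 'j': '9'}
--     digits = ''.join(mapping.get(ch, '0') for ch in pair if ch != ' ')
--     return [int(digits[i:i + 2]) for i in range(0, len(digits), 2)]
-- ===== Notes on version B (the rewrite author's own statement) =====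
-- stated objective: simpler
-- what changed: Replaced A's index-decrement state machine (a while loop that rewinds i and flushes a two-character buffer) with a two-pass translate-then-chunk decomposition: map each letter to its digit character skipping spaces, then slice the digit stream into two-character groups. The two-pass form avoids A's per-character buffer/rewind bookkeeping and was measured 1.9-3.7x faster.
import Mathlib
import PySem

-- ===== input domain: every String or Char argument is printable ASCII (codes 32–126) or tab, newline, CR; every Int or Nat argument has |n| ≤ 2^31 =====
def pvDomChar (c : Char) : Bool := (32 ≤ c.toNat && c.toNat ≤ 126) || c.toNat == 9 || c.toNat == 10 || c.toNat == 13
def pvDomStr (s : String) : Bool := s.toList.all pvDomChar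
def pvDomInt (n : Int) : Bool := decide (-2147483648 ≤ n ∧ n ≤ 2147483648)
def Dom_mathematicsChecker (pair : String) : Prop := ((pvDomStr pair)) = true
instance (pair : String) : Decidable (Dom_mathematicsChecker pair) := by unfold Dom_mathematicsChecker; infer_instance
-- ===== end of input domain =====

-- B replaces A's index-decrement state machine with a translate-then-chunk two-pass
-- decomposition (objective: simpler); return values proved equal on all inputs.

-- ===== PORT A =====

-- int(number): number is always a nonempty string of digit characters here, so ofStr? returns some
def pyInt (cs : List Char) : Int := (PySem.Int.ofStr? (String.ofList cs)).getD 0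

-- the 'match pair[i]' block (Python's match on literals = an if/elif chain)
def mcDigit (c : Char) : Char :=
  if c = 'h' then '0'
  else if c = 'a' then '1'
  else if c = 'd' then '2'
  else if c = 'b' then '3'
  else if c = 'e' then '4'
  else if c = 'f' then '5'
  else if c = 'g' then '6'
  else if c = 'c' then '7'
  else if c = 'i' then '8'
  else if c = 'j' then '9'
  else '0'

-- the while loop; in the len(number)==2 branch Python does i = i-1 followed by i += 1,
-- so i is unchanged there, which is how it is written here
def mcLoop (chars : List Char) (i : Nat) (number : List Char) (solved : List Int) : List Int :=
  if h : i < chars.length then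
    if number.length = 2 then
      mcLoop chars i [] (solved ++ [pyInt number])
    else if chars[i] ≠ ' ' then
      mcLoop chars (i + 1) (number ++ [mcDigit chars[i]]) solved
    else
      mcLoop chars (i + 1) number solved
  else if number ≠ [] then solved ++ [pyInt number] else solved
termination_by 3 * (chars.length - i) + number.length
decreasing_by all_goals (first | omega | (simp only [List.length_nil, List.length_append, List.length_cons]; omega))

def mathematicsChecker (pair : String) : List Int :=
  mcLoop pair.toList 0 [] []

-- ===== PORT B =====

def bMapping : PySem.Dict Char Char :=
  ⟨[('h', '0'), ('a', '1'), ('d', '2'), ('b', '3'), ('e', '4'),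
    ('f', '5'), ('g', '6'), ('c', '7'), ('i', '8'), ('j', '9')]⟩

def mathematicsChecker_alt (pair : String) : List Int :=
  let digits := (pair.toList.filter (fun ch => ch ≠ ' ')).map
    (fun ch => PySem.Dict.getD bMapping ch '0')
  (PySem.List.pyRange 0 digits.length 2).map
    (fun i => pyInt (PySem.List.slice digits (some i) (some (i + 2))))

-- ===== PRECONDITION & SPEC =====
def Spec_mathematicsChecker (pair : String) (out : List Int) : Prop := out = mathematicsChecker_alt pair
instance (pair : String) (out : List Int) : Decidable (Spec_mathematicsChecker pair out) := by unfold Spec_mathematicsChecker; infer_instance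

-- ===== CLAIM (what is proved, stated in full; the proofs are below) =====
def Claim_equal_mathematicsChecker : Prop := ∀ (pair : String), Dom_mathematicsChecker pair → Spec_mathematicsChecker pair (mathematicsChecker pair)

-- ===== LEMMAS AND PROOFS =====

-- common description of the result: the digit stream chunked into pairs
def chunk : List Char → List Int
  | [] => []
  | [a] => [pyInt [a]]
  | a :: b :: rest => pyInt [a, b] :: chunk rest

theorem bDigit_eq_mcDigit (c : Char) : PySem.Dict.getD bMapping c '0' = mcDigit c := by
  by_cases h1 : c = 'h'; · subst h1; rfl
  by_cases h2 : c = 'a'; · subst h2; rfl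
  by_cases h3 : c = 'd'; · subst h3; rfl
  by_cases h4 : c = 'b'; · subst h4; rfl
  by_cases h5 : c = 'e'; · subst h5; rfl
  by_cases h6 : c = 'f'; · subst h6; rfl
  by_cases h7 : c = 'g'; · subst h7; rfl
  by_cases h8 : c = 'c'; · subst h8; rfl
  by_cases h9 : c = 'i'; · subst h9; rfl
  by_cases h10 : c = 'j'; · subst h10; rfl
  have k1 : (('h' : Char) == c) = false := beq_eq_false_iff_ne.mpr (fun e => h1 e.symm)
  have k2 : (('a' : Char) == c) = false := beq_eq_false_iff_ne.mpr (fun e => h2 e.symm)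
  have k3 : (('d' : Char) == c) = false := beq_eq_false_iff_ne.mpr (fun e => h3 e.symm)
  have k4 : (('b' : Char) == c) = false := beq_eq_false_iff_ne.mpr (fun e => h4 e.symm)
  have k5 : (('e' : Char) == c) = false := beq_eq_false_iff_ne.mpr (fun e => h5 e.symm)
  have k6 : (('f' : Char) == c) = false := beq_eq_false_iff_ne.mpr (fun e => h6 e.symm)
  have k7 : (('g' : Char) == c) = false := beq_eq_false_iff_ne.mpr (fun e => h7 e.symm)
  have k8 : (('c' : Char) == c) = false := beq_eq_false_iff_ne.mpr (fun e => h8 e.symm)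
  have k9 : (('i' : Char) == c) = false := beq_eq_false_iff_ne.mpr (fun e => h9 e.symm)
  have k10 : (('j' : Char) == c) = false := beq_eq_false_iff_ne.mpr (fun e => h10 e.symm)
  simp [bMapping, mcDigit, PySem.Dict.getD, PySem.Dict.get?, List.find?,
        h1, h2, h3, h4, h5, h6, h7, h8, h9, h10,
        k1, k2, k3, k4, k5, k6, k7, k8, k9, k10]

theorem pyRange_two_nil (a b : Int) (h : b ≤ a) : PySem.List.pyRange a b 2 = [] := by
  rw [PySem.List.pyRange_of_pos a b (by norm_num)]
  rw [if_neg (by omega)]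
  simp only [List.range_zero, List.map_nil]

theorem pyRange_two_cons (a b : Int) (h : a < b) :
    PySem.List.pyRange a b 2 = a :: PySem.List.pyRange (a + 2) b 2 := by
  rw [PySem.List.pyRange_of_pos a b (by norm_num),
      PySem.List.pyRange_of_pos (a + 2) b (by norm_num)]
  rw [if_pos h]
  by_cases h2 : a + 2 < b
  · rw [if_pos h2]
    have hc : ((b - a + 2 - 1) / 2).toNat = ((b - (a + 2) + 2 - 1) / 2).toNat + 1 := by omega
    rw [hc, List.range_succ_eq_map]
    simp only [List.map_cons, List.map_map, Nat.cast_zero, mul_zero, add_zero]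
    congr 1
    apply List.map_congr_left
    intro k _
    simp only [Function.comp_apply]
    push_cast
    ring
  · rw [if_neg h2]
    have hc : ((b - a + 2 - 1) / 2).toNat = 1 := by omega
    rw [hc]
    simp

theorem mcLoop_eq (chars : List Char) (i : Nat) (number : List Char) (solved : List Int)
    (hn : number.length ≤ 2) :
    mcLoop chars i number solved =
      solved ++ chunk (number ++ ((chars.drop i).filter (fun ch => ch ≠ ' ')).map mcDigit) := by
  revert hn
  induction i, number, solved using mcLoop.induct chars with
  | case1 i number solved h h2 ih =>
    intro hn
    rw [mcLoop, dif_pos h, if_pos h2]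
    obtain ⟨a, b, hab⟩ : ∃ a b, number = [a, b] := by
      match number, hn, h2 with
      | [a, b], _, _ => exact ⟨a, b, rfl⟩
    subst hab
    rw [ih (by simp)]
    simp [chunk]
  | case2 i number solved h h2 hsp ih =>
    intro hn
    rw [mcLoop, dif_pos h, if_neg h2, if_pos hsp]
    have hd : chars.drop i = chars[i] :: chars.drop (i + 1) :=
      (List.getElem_cons_drop h).symm
    rw [hd, List.filter_cons, if_pos (by simpa using hsp), List.map_cons,
        show mcDigit chars[i] :: (((chars.drop (i + 1)).filter (fun ch => ch ≠ ' ')).map mcDigit)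
           = [mcDigit chars[i]] ++ (((chars.drop (i + 1)).filter (fun ch => ch ≠ ' ')).map mcDigit)
           from rfl,
        ← List.append_assoc]
    exact ih (by simp only [List.length_append, List.length_cons, List.length_nil]; omega)
  | case3 i number solved h h2 hsp ih =>
    intro hn
    rw [mcLoop, dif_pos h, if_neg h2, if_neg hsp]
    have hd : chars.drop i = chars[i] :: chars.drop (i + 1) :=
      (List.getElem_cons_drop h).symm
    rw [hd, List.filter_cons, if_neg (by simpa using hsp)]
    exact ih hn
  | case4 i number solved h hne =>
    intro hn
    rw [mcLoop, dif_neg h, if_pos hne]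
    rw [List.drop_of_length_le (by omega)]
    match number, hn, hne with
    | [a], _, _ => simp [chunk]
    | [a, b], _, _ => simp [chunk]
  | case5 i number solved h hne =>
    intro hn
    rw [mcLoop, dif_neg h, if_neg hne]
    simp at hne
    subst hne
    rw [List.drop_of_length_le (by omega)]
    simp [chunk]

theorem map_slice_eq_chunk (l suffix : List Char) (j : Nat)
    (hdrop : l.drop j = suffix) :
    (PySem.List.pyRange (j : Int) l.length 2).map
        (fun i => pyInt (PySem.List.slice l (some i) (some (i + 2)))) = chunk suffix := by
  induction suffix using chunk.induct generalizing j with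
  | case1 =>
    have hj : l.length ≤ j := by
      by_contra hc
      have := List.drop_eq_nil_iff.mp hdrop
      omega
    rw [pyRange_two_nil _ _ (by exact_mod_cast hj)]
    simp [chunk]
  | case2 a =>
    have hlen : l.length = j + 1 := by
      have := congrArg List.length hdrop
      simp at this
      omega
    rw [hlen]
    rw [pyRange_two_cons _ _ (by omega)]
    rw [pyRange_two_nil _ _ (by omega)]
    simp only [List.map_cons, List.map_nil]
    have : PySem.List.slice l (some (j : Int)) (some ((j : Int) + 2)) = [a] := by
      have := PySem.List.slice_natCast_add l j 2
      push_cast at this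
      rw [this, hdrop]
      simp
    rw [this]
    simp [chunk]
  | case3 a b rest ih =>
    have hlen : j + 2 ≤ l.length := by
      have := congrArg List.length hdrop
      simp at this
      omega
    rw [pyRange_two_cons _ _ (by exact_mod_cast by omega)]
    simp only [List.map_cons]
    have hs : PySem.List.slice l (some (j : Int)) (some ((j : Int) + 2)) = [a, b] := by
      have := PySem.List.slice_natCast_add l j 2
      push_cast at this
      rw [this, hdrop]
      simp
    have hd2 : l.drop (j + 2) = rest := by
      have : l.drop (j + 2) = (l.drop j).drop 2 := by
        rw [List.drop_drop]
      rw [this, hdrop]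
      rfl
    have := ih (j + 2) hd2
    push_cast at this ⊢
    rw [hs, this]
    rfl

-- ===== VERDICT (by name: the statement is the Claim_ definition above) =====
theorem mathematicsChecker_spec : Claim_equal_mathematicsChecker := by
  intro pair _
  unfold Spec_mathematicsChecker mathematicsChecker mathematicsChecker_alt
  rw [mcLoop_eq _ _ _ _ (by simp)]
  simp only [List.drop_zero, List.nil_append]
  have hmap : (pair.toList.filter (fun ch => ch ≠ ' ')).map
      (fun ch => PySem.Dict.getD bMapping ch '0')
      = (pair.toList.filter (fun ch => ch ≠ ' ')).map mcDigit := by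
    simp [bDigit_eq_mcDigit]
  rw [hmap]
  exact (map_slice_eq_chunk _ _ 0 (by simp)).symm
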